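-- pv_equiv track=rewrite | github.com/jcraig949jfi/Prometheus | cartography/shared/scripts/v2/recurrence_stability.py | char_poly_factors_mod_p
-- ===== SOURCE A (Python) =====
-- def char_poly_factors_mod_p(coeffs_int, p):
--     """Check if the characteristic polynomial factors mod p.
--
--     Characteristic poly: x^k + c_1*x^{k-1} + ... + c_k
--     where coeffs_int = [c_1, c_2, ..., c_k] (BM convention).
--
--     Returns: (has_root, roots_mod_p, disc_mod_p_zero)
--     """
--     deg = len(coeffs_int)
--     if deg == 0:
--         return False, [], False
--
--     # Evaluate char poly at each x in F_p
--     roots = []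
--     for x in range(p):
--         val = pow(x, deg, p)
--         for j, c in enumerate(coeffs_int):
--             val = (val + (c % p) * pow(x, deg - 1 - j, p)) % p
--         if val % p == 0:
--             roots.append(x)
--
--     return len(roots) > 0, roots, None
-- ===== SOURCE B (Python) =====
-- def _horner_mod(cs, x, p):
--     acc = 0
--     for c in cs:
--         acc = (acc * x + c) % p
--     return acc
--
--
-- def char_poly_factors_mod_p(coeffs_int, p):
--     """Check if the characteristic polynomial factors mod p.
--
--     Filters F_p by a single Horner evaluation of x^k + c_1*x^{k-1} + ... + c_k.
--     """
--     full = [1] + coeffs_int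
--     roots = [x for x in range(p) if _horner_mod(full, x, p) == 0]
--     return len(roots) > 0, roots, None
-- ===== Notes on version B (the rewrite author's own statement) =====
-- stated objective: faster
-- what changed: Replaces the per-coefficient modular exponentiation (pow(x, deg-1-j, p) inside a nested enumerate loop) with a single Horner pass per point, and builds the root list by filtering range(p) with that predicate instead of appending inside the scan.
-- outside the precondition, e.g. on char_poly_factors_mod_p([], 5): A returns (False, [], False), B returns (False, [], None)
import Mathlib
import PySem

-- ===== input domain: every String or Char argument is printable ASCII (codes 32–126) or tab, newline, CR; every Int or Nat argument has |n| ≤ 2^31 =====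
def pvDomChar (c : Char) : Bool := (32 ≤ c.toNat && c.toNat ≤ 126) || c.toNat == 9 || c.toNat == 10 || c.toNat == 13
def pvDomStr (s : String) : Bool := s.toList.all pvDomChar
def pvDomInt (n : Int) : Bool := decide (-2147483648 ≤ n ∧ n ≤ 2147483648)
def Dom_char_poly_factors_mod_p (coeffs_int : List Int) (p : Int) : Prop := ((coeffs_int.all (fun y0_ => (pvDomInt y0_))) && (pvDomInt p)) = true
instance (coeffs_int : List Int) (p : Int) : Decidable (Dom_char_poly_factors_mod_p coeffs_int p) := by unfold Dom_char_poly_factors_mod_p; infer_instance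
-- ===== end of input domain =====

-- B replaces A's per-coefficient modular exponentiation with one Horner pass per point (faster).


-- ===== PORT A =====
-- pow(x, e, p): the loop body only runs for x in range(p) (so p ≥ 1, x ≥ 0) and the
-- exponents deg and deg-1-j are ≥ 0 there, so PySem.Int.powMod with Nat exponent is exact.
def char_poly_factors_mod_p (coeffs_int : List Int) (p : Int) : Bool × List Int × Option Int :=
  let deg := coeffs_int.length
  if deg = 0 then (false, [], none)  -- Python returns (False, [], False): third slot is a bool, not an int/None; excluded by Pre_
  else
    let roots := (PySem.List.pyRange 0 p 1).foldl (fun roots x =>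
      let val0 := PySem.Int.powMod x deg p
      let val := (PySem.List.enumerate coeffs_int).foldl
        (fun val jc =>
          PySem.Int.mod (val + PySem.Int.mod jc.2 p * PySem.Int.powMod x ((deg : Int) - 1 - jc.1).toNat p) p)
        val0
      if PySem.Int.mod val p == 0 then roots ++ [x] else roots) []
    (decide (roots.length > 0), roots, none)

-- ===== PORT B =====
-- _horner_mod: the accumulator loop, as the obvious structural recursion on the list
def hornerMod (x p : Int) (acc : Int) : List Int → Int
  | [] => acc
  | c :: cs => hornerMod x p (PySem.Int.mod (acc * x + c) p) cs

def char_poly_factors_mod_p_alt (coeffs_int : List Int) (p : Int) : Bool × List Int × Option Int :=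
  let full := 1 :: coeffs_int
  let roots := (PySem.List.pyRange 0 p 1).filter (fun x => hornerMod x p 0 full == 0)
  (decide (roots.length > 0), roots, none)

-- ===== PRECONDITION & SPEC =====
-- Pre_ excludes the empty coefficient list, where A returns (False, [], False): a bool in the
-- Option-Int slot, which has no value of the declared return type.
def Pre_char_poly_factors_mod_p (coeffs_int : List Int) (p : Int) : Prop := coeffs_int ≠ []
instance (coeffs_int : List Int) (p : Int) : Decidable (Pre_char_poly_factors_mod_p coeffs_int p) := by unfold Pre_char_poly_factors_mod_p; infer_instance
def pvWitness_char_poly_factors_mod_p : List Int × Int := ([1, -2], 7)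

def Spec_char_poly_factors_mod_p (coeffs_int : List Int) (p : Int) (out : Bool × List Int × Option Int) : Prop := out = char_poly_factors_mod_p_alt coeffs_int p
instance (coeffs_int : List Int) (p : Int) (out : Bool × List Int × Option Int) : Decidable (Spec_char_poly_factors_mod_p coeffs_int p out) := by unfold Spec_char_poly_factors_mod_p; infer_instance

-- ===== CLAIM (what is proved, stated in full; the proofs are below) =====
def Claim_equal_char_poly_factors_mod_p : Prop := ∀ (coeffs_int : List Int) (p : Int), Dom_char_poly_factors_mod_p coeffs_int p → Pre_char_poly_factors_mod_p coeffs_int p → Spec_char_poly_factors_mod_p coeffs_int p (char_poly_factors_mod_p coeffs_int p)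

-- ===== LEMMAS AND PROOFS =====

-- Python % with a positive modulus is Int.emod
theorem pymod_pos (a p : Int) (hp : 0 < p) : PySem.Int.mod a p = a % p := by
  unfold PySem.Int.mod
  rw [Int.fmod_eq_emod]
  simp [Int.le_of_lt hp]

theorem emod_modEq_self (a p : Int) : a % p ≡ a [ZMOD p] :=
  Int.emod_emod_of_dvd a dvd_rfl

-- the pure "sum of monomials" value of a coefficient suffix: Spure x [c_0,...,c_m] = sum c_k x^(m-k)
def Spure (x : Int) : List Int → Int
  | [] => 0
  | c :: t => c * x ^ t.length + Spure x t

-- B's Horner recursion (reduction at every step), modulo p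
theorem horner_emod (x p : Int) (hp : 0 < p) : ∀ (l : List Int) (v : Int),
    (hornerMod x p v l) % p = (v * x ^ l.length + Spure x l) % p := by
  intro l
  induction l with
  | nil => intro v; simp [hornerMod, Spure]
  | cons c t ih =>
    intro v
    rw [hornerMod, ih, pymod_pos _ _ hp]
    calc ((v * x + c) % p * x ^ t.length + Spure x t) % p
        = ((v * x + c) * x ^ t.length + Spure x t) % p :=
          ((emod_modEq_self _ p).mul_right _).add_right _
      _ = (v * x ^ (c :: t).length + Spure x (c :: t)) % p := by
          simp only [Spure, List.length_cons]; ring_nf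

-- B's Horner recursion over a nonempty list is already reduced mod p
theorem horner_reduced (x p : Int) (hp : 0 < p) : ∀ (c : Int) (l : List Int) (v : Int),
    (hornerMod x p v (c :: l)) % p = hornerMod x p v (c :: l) := by
  intro c l
  induction l generalizing c with
  | nil =>
    intro v
    simp only [hornerMod, pymod_pos _ _ hp]
    exact Int.emod_emod_of_dvd _ dvd_rfl
  | cons d t ih =>
    intro v
    simp only [hornerMod] at ih ⊢
    exact ih d _

-- A's inner fold over the enumerate of a suffix starting at index s, where s + length = deg
theorem afold_emod (x p : Int) (hp : 0 < p) (deg : Nat) : ∀ (l : List Int) (s : Int) (v : Int),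
    0 ≤ s → s + l.length = (deg : Int) →
    ((PySem.List.enumerate l s).foldl
        (fun val jc =>
          PySem.Int.mod (val + PySem.Int.mod jc.2 p * PySem.Int.powMod x ((deg : Int) - 1 - jc.1).toNat p) p)
        v) % p
      = (v + Spure x l) % p := by
  intro l
  induction l with
  | nil => intro s v _ _; simp [Spure, PySem.List.enumerate_nil]
  | cons c t ih =>
    intro s v hs hlen
    rw [PySem.List.enumerate_cons]
    simp only [List.foldl_cons]
    have hexp : ((deg : Int) - 1 - s).toNat = t.length := by
      simp only [List.length_cons] at hlen
      push_cast at hlen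
      omega
    rw [ih (s + 1) _ (by omega)
        (by simp only [List.length_cons] at hlen ⊢; push_cast at hlen ⊢; omega)]
    simp only [hexp, PySem.Int.powMod, pymod_pos _ _ hp]
    have h1 : (v + c % p * (x ^ t.length % p)) % p ≡ v + c * x ^ t.length [ZMOD p] :=
      (emod_modEq_self _ p).trans
        (((emod_modEq_self c p).mul (emod_modEq_self _ p)).add_left v)
    calc ((v + c % p * (x ^ t.length % p)) % p + Spure x t) % p
        = (v + c * x ^ t.length + Spure x t) % p := h1.add_right _
      _ = (v + Spure x (c :: t)) % p := by
          simp only [Spure]; ring_nf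

-- the two per-point tests agree (for p > 0 and a nonempty coefficient list)
theorem inner_eq (coeffs : List Int) (hne : coeffs ≠ []) (p : Int) (hp : 0 < p) (x : Int) :
    PySem.Int.mod
      ((PySem.List.enumerate coeffs).foldl
        (fun val jc =>
          PySem.Int.mod (val + PySem.Int.mod jc.2 p *
            PySem.Int.powMod x ((coeffs.length : Int) - 1 - jc.1).toNat p) p)
        (PySem.Int.powMod x coeffs.length p)) p
      = hornerMod x p 0 (1 :: coeffs) := by
  obtain ⟨c, l, rfl⟩ : ∃ c l, coeffs = c :: l := by
    cases coeffs with
    | nil => exact absurd rfl hne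
    | cons c l => exact ⟨c, l, rfl⟩
  rw [pymod_pos _ _ hp,
      afold_emod x p hp (c :: l).length (c :: l) 0 _ le_rfl (by simp)]
  have hB : hornerMod x p 0 (1 :: c :: l) = hornerMod x p (PySem.Int.mod (0 * x + 1) p) (c :: l) := rfl
  rw [hB, ← horner_reduced x p hp c l, horner_emod x p hp]
  simp only [PySem.Int.powMod, pymod_pos _ _ hp, zero_mul, zero_add]
  calc (x ^ (c :: l).length % p + Spure x (c :: l)) % p
      = (x ^ (c :: l).length + Spure x (c :: l)) % p :=
        (emod_modEq_self _ p).add_right _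
    _ = (1 % p * x ^ (c :: l).length + Spure x (c :: l)) % p :=
        (((((emod_modEq_self 1 p).mul_right _).add_right _).trans
          (by rw [one_mul])).symm)

-- ===== VERDICT (by name: the statement is the Claim_ definition above) =====
theorem char_poly_factors_mod_p_spec : Claim_equal_char_poly_factors_mod_p := by
  intro coeffs p _ hpre
  unfold Spec_char_poly_factors_mod_p char_poly_factors_mod_p char_poly_factors_mod_p_alt
  have hlen : coeffs.length ≠ 0 := by
    intro h; exact hpre (List.eq_nil_of_length_eq_zero h)
  by_cases hp : 0 < p
  · simp only [hlen, if_false, PySem.List.foldl_append_if_eq_filter, List.nil_append]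
    rw [List.filter_congr (fun x _ => by rw [inner_eq coeffs hpre p hp x])]
  · rw [PySem.List.pyRange_one_eq_nil (by omega)]
    simp [hlen]
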